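-- pv_equiv track=rewrite | github.com/gw4621/Algorithm-Problem-Solving | Topcoder/SRM484_NumberMagic.py | theNumber
-- ===== SOURCE A (Python) =====
-- def theNumber(answer):
-- 	result = set([i for i in range(1, 17)])
-- 	card = [set([1, 2, 3, 4, 5, 6, 7, 8]), set([1, 2, 3, 4, 9, 10, 11, 12]), set([1, 2, 5, 6, 9, 10, 13, 14]), set([1, 3, 5, 7, 9, 11, 13, 15])]
-- 	for i in range(4):
-- 		if answer[i].lower() == 'y':
-- 			result &= card[i]
-- 		else:
-- 			result -= card[i]
-- 	return tuple(result)[0]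
-- ===== SOURCE B (Python) =====
-- def theNumber(answer):
--     m = 0
--     for i in range(4):
--         m = m * 2 + (0 if answer[i].lower() == 'y' else 1)
--     return m + 1
-- ===== Notes on version B (the rewrite author's own statement) =====
-- stated objective: simpler
-- what changed: Replaced the candidate-set intersection/difference over four hard-coded 8-element cards by direct binary accumulation of one integer (each 'y'/non-'y' answer contributes one bit), returning m+1.
import Mathlib
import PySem

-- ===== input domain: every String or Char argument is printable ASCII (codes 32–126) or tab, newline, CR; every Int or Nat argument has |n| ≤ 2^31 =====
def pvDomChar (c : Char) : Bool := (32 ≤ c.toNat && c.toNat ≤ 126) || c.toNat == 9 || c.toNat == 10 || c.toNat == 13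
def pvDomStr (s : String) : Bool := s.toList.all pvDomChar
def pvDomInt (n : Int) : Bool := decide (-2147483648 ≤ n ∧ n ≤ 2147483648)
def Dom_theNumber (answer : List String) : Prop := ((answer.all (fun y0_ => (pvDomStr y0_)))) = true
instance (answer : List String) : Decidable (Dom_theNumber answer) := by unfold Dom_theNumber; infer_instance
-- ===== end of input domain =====

-- B replaces A's candidate-set intersection/difference over four card sets by binary accumulation of a single integer; objective: simpler.

-- ===== PORT A =====
-- literal transliteration of A: candidate set 1..16, four card sets, intersect on 'y', subtract otherwise, take first element.
def theNumber (answer : List String) : Int :=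
  let result : PySem.Set Int := PySem.Set.ofList (PySem.List.pyRange 1 17 1)
  let card : List (PySem.Set Int) :=
    [PySem.Set.ofList [1, 2, 3, 4, 5, 6, 7, 8],
     PySem.Set.ofList [1, 2, 3, 4, 9, 10, 11, 12],
     PySem.Set.ofList [1, 2, 5, 6, 9, 10, 13, 14],
     PySem.Set.ofList [1, 3, 5, 7, 9, 11, 13, 15]]
  let result :=
    (PySem.List.pyRange 0 4 1).foldl (fun (res : PySem.Set Int) (i : Int) =>
      if PySem.Str.lower (PySem.List.pyGetD answer i "") == "y" then
        PySem.Set.inter res (PySem.List.pyGetD card i PySem.Set.empty)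
      else
        PySem.Set.diff res (PySem.List.pyGetD card i PySem.Set.empty)) result
  -- tuple(result)[0]: the surviving set is always a singleton under Pre_, so this is its unique element; getD 0 is a totality guard only
  PySem.List.pyGetD result 0 0

-- ===== PORT B =====
def theNumber_alt (answer : List String) : Int :=
  let m :=
    (PySem.List.pyRange 0 4 1).foldl (fun (m : Int) (i : Int) =>
      m * 2 + (if PySem.Str.lower (PySem.List.pyGetD answer i "") == "y" then 0 else 1)) 0
  m + 1

-- ===== PRECONDITION & SPEC =====
-- A indexes answer[0..3]; Pre_ excludes lists shorter than 4, where A raises IndexError.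
def Pre_theNumber (answer : List String) : Prop := 4 ≤ answer.length
instance (answer : List String) : Decidable (Pre_theNumber answer) := by unfold Pre_theNumber; infer_instance
def pvWitness_theNumber : List String := ["y", "N", "y", "n"]

def Spec_theNumber (answer : List String) (out : Int) : Prop := out = theNumber_alt answer
instance (answer : List String) (out : Int) : Decidable (Spec_theNumber answer out) := by unfold Spec_theNumber; infer_instance

-- ===== CLAIM (what is proved, stated in full; the proofs are below) =====
def Claim_equal_theNumber : Prop := ∀ (answer : List String), Dom_theNumber answer → Pre_theNumber answer → Spec_theNumber answer (theNumber answer)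

-- ===== LEMMAS AND PROOFS =====

-- ===== VERDICT (by name: the statement is the Claim_ definition above) =====
theorem theNumber_spec : Claim_equal_theNumber := by
  intro answer _ hpre
  unfold Pre_theNumber at hpre
  match answer, hpre with
  | a0 :: a1 :: a2 :: a3 :: rest, _ =>
    unfold Spec_theNumber theNumber theNumber_alt
    simp only [show PySem.List.pyRange 0 4 1 = ([0, 1, 2, 3] : List Int) from by decide,
      List.foldl_cons, List.foldl_nil, PySem.List.pyGetD_ofNat',
      List.getD_cons_zero, List.getD_cons_succ]
    rcases Bool.eq_false_or_eq_true (PySem.Str.lower a0 == "y") with h0 | h0 <;>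
    rcases Bool.eq_false_or_eq_true (PySem.Str.lower a1 == "y") with h1 | h1 <;>
    rcases Bool.eq_false_or_eq_true (PySem.Str.lower a2 == "y") with h2 | h2 <;>
    rcases Bool.eq_false_or_eq_true (PySem.Str.lower a3 == "y") with h3 | h3 <;>
      simp only [h0, h1, h2, h3] <;> decide
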